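-- pv_equiv track=rewrite | github.com/charlesmurphy1/midynet | midynet/utility/convert.py | reduce_partition
-- ===== SOURCE A (Python) =====
-- def reduce_partition(partition: list[int]) -> list[int]:
--     remap = {}
--     id = 0
--     reduced_partition = []
--     for b in partition:
--         if b not in remap:
--             remap[b] = id
--             id += 1
--         reduced_partition.append(remap[b])
--     return reduced_partition
-- ===== SOURCE B (Python) =====
-- def reduce_partition(partition: list[int]) -> list[int]:
--     # Dict-free: the canonical label of b is the number of distinct values
--     # occurring strictly before b's first occurrence.
--     return [len(set(partition[:partition.index(b)])) for b in partition]
-- ===== Notes on version B (the rewrite author's own statement) =====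
-- stated objective: alternative
-- what changed: A's stateful single pass (incrementally built value-to-id dict with a running counter) is replaced by a dict-free per-element computation: the label of b is len(set(partition[:partition.index(b)])), the count of distinct values before b's first occurrence; no remap table or counter is maintained at all.
import Mathlib
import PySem

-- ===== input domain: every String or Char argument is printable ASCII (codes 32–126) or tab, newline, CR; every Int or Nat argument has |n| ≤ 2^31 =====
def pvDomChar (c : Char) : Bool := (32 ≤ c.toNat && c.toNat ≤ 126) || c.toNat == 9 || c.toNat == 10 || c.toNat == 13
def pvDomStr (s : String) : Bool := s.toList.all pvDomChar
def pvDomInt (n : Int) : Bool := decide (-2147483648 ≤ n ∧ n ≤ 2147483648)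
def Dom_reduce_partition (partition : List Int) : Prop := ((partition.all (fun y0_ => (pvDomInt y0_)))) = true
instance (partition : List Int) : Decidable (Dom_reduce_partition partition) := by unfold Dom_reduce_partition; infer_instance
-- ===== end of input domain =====

-- B drops A's stateful pass (incremental value→id dict plus running counter) entirely: the label
-- of b is computed per element as the number of distinct values before b's first occurrence.

-- ===== PORT A =====
-- literal transliteration of A's loop: remap dict, running id, output accumulator
def rpLoop : List Int → PySem.Dict Int Int → Int → List Int → List Int
  | [], _remap, _id, out => out
  | b :: rest, remap, id, out =>
    if remap.contains b then
      rpLoop rest remap id (out ++ [remap.getD b 0])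
    else
      rpLoop rest (remap.insert b id) (id + 1) (out ++ [(remap.insert b id).getD b 0])

def reduce_partition (partition : List Int) : List Int :=
  rpLoop partition PySem.Dict.empty 0 []

-- ===== PORT B =====
-- [len(set(partition[:partition.index(b)])) for b in partition]
-- partition.index(b) never raises (b ∈ partition), so .getD 0 only totalizes the lookup;
-- partition[:k] with 0 ≤ k is exactly List.take k; len(set(pre)) is the length of Set.ofList pre.
def reduce_partition_alt (partition : List Int) : List Int :=
  partition.map (fun b =>
    (((PySem.Set.ofList
        (partition.take ((PySem.List.index? partition b).getD 0))).length : Nat) : Int))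

-- ===== PRECONDITION & SPEC =====
def Spec_reduce_partition (partition : List Int) (out : List Int) : Prop := out = reduce_partition_alt partition
instance (partition : List Int) (out : List Int) : Decidable (Spec_reduce_partition partition out) := by unfold Spec_reduce_partition; infer_instance

-- ===== CLAIM (what is proved, stated in full; the proofs are below) =====
def Claim_equal_reduce_partition : Prop := ∀ (partition : List Int), Dom_reduce_partition partition → Spec_reduce_partition partition (reduce_partition partition)

-- ===== LEMMAS AND PROOFS =====

-- index into an update is stable for elements already present
lemma index?_update_of_mem (seen : List Int) (xs : List Int) (b : Int) (hb : b ∈ seen) :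
    PySem.List.index? (PySem.Set.update seen xs) b = PySem.List.index? seen b := by
  rw [PySem.Set.update_eq_append_filter]
  exact PySem.List.index?_append_of_mem _ hb

-- the position of b in the first-appearance distinct list equals the number of distinct
-- values collected before b's first occurrence
lemma index?_update_eq_take (xs : List Int) : ∀ (seen : List Int) (b : Int) (j : Nat),
    b ∉ seen → PySem.List.index? xs b = some j →
    PySem.List.index? (PySem.Set.update seen xs) b
      = some (PySem.Set.update seen (xs.take j)).length := by
  induction xs with
  | nil => intro seen b j _ h; rw [(PySem.List.index?_eq_none_iff [] b).mpr (by simp)] at h; cases h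
  | cons x xs ih =>
    intro seen b j hbs hj
    by_cases hbx : b = x
    · subst hbx
      rw [PySem.List.index?_cons_self] at hj
      obtain rfl : j = 0 := by injection hj with h; omega
      rw [PySem.Set.update_cons, PySem.Set.add_of_not_mem hbs,
        index?_update_of_mem (seen ++ [b]) xs b (by simp),
        PySem.List.index?_append_singleton_self seen b hbs]
      simp [PySem.Set.update]
    · have hxb : x ≠ b := fun h => hbx h.symm
      rw [PySem.List.index?_cons_of_ne xs hxb] at hj
      obtain ⟨j', hj', rfl⟩ := Option.map_eq_some_iff.mp hj
      have hbs' : b ∉ PySem.Set.add seen x := by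
        rw [PySem.Set.mem_add]; rintro (h | h) <;> [exact hbs h; exact hbx h]
      rw [List.take_succ_cons, PySem.Set.update_cons, PySem.Set.update_cons,
        ih (PySem.Set.add seen x) b j' hbs' hj']

-- main invariant: if remap is exactly the first-appearance index table of `seen`
-- (with id = seen.length), the rest of A's loop produces the mapping into update seen rest
lemma rpLoop_eq (rest : List Int) : ∀ (seen : List Int) (remap : PySem.Dict Int Int) (out : List Int),
    (∀ c, remap.get? c = (PySem.List.index? seen c).map (fun k => (k : Int))) →
    rpLoop rest remap (seen.length : Int) out
      = out ++ rest.map (fun b =>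
          (((PySem.List.index? (PySem.Set.update seen rest) b).getD 0 : Nat) : Int)) := by
  induction rest with
  | nil => intro seen remap out _; simp [rpLoop]
  | cons b rest ih =>
    intro seen remap out hinv
    by_cases hb : b ∈ seen
    · obtain ⟨k, hk⟩ : ∃ k, PySem.List.index? seen b = some k :=
        Option.isSome_iff_exists.mp ((PySem.List.index?_isSome_iff seen b).mpr hb)
      have hget : remap.get? b = some (k : Int) := by rw [hinv b, hk]; rfl
      have hcon : remap.contains b = true := by
        rw [PySem.Dict.contains_eq_isSome_get?, hget]; rfl
      have hgetD : remap.getD b 0 = (k : Int) := PySem.Dict.getD_of_get?_eq_some _ 0 hget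
      have hupd : PySem.Set.update seen (b :: rest) = PySem.Set.update seen rest := by
        rw [PySem.Set.update_cons, PySem.Set.add_of_mem hb]
      have hidx : PySem.List.index? (PySem.Set.update seen rest) b = some k := by
        rw [index?_update_of_mem seen rest b hb]; exact hk
      rw [rpLoop, if_pos hcon, hgetD, ih seen remap _ hinv]
      simp only [hupd, List.map_cons, hidx, Option.getD_some, List.append_assoc,
        List.cons_append, List.nil_append]
    · have hcon : remap.contains b = false := by
        rw [PySem.Dict.contains_eq_isSome_get?, hinv b,
            (PySem.List.index?_eq_none_iff seen b).mpr hb]; rfl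
      have hidxb : PySem.List.index? (seen ++ [b]) b = some seen.length :=
        PySem.List.index?_append_singleton_self seen b hb
      have hinv' : ∀ c, (remap.insert b (seen.length : Int)).get? c
          = (PySem.List.index? (seen ++ [b]) c).map (fun k => (k : Int)) := by
        intro c
        by_cases hc : c = b
        · subst hc
          rw [PySem.Dict.get?_insert_self, hidxb]; rfl
        · rw [PySem.Dict.get?_insert_of_ne _ _ hc, hinv c]
          by_cases hcs : c ∈ seen
          · rw [PySem.List.index?_append_of_mem _ hcs]
          · rw [(PySem.List.index?_eq_none_iff seen c).mpr hcs]
            rw [(PySem.List.index?_eq_none_iff (seen ++ [b]) c).mpr (by simp [hcs, hc])]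
      have hgetD : (remap.insert b (seen.length : Int)).getD b 0 = (seen.length : Int) :=
        PySem.Dict.getD_of_get?_eq_some _ 0 (PySem.Dict.get?_insert_self _ _ _)
      have hupd : PySem.Set.update seen (b :: rest) = PySem.Set.update (seen ++ [b]) rest := by
        rw [PySem.Set.update_cons, PySem.Set.add_of_not_mem hb]
      have hlen : (seen.length : Int) + 1 = ((seen ++ [b]).length : Int) := by simp
      have hidx : PySem.List.index? (PySem.Set.update (seen ++ [b]) rest) b
          = some seen.length := by
        rw [index?_update_of_mem (seen ++ [b]) rest b (by simp)]; exact hidxb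
      rw [rpLoop, if_neg (by simp [hcon]), hgetD, hlen, ih (seen ++ [b]) _ _ hinv']
      simp only [hupd, List.map_cons, hidx, Option.getD_some, List.append_assoc,
        List.cons_append, List.nil_append]

-- ===== VERDICT (by name: the statement is the Claim_ definition above) =====
theorem reduce_partition_spec : Claim_equal_reduce_partition := by
  intro partition _
  unfold Spec_reduce_partition reduce_partition reduce_partition_alt
  have h0 : ∀ c, (PySem.Dict.empty : PySem.Dict Int Int).get? c
      = (PySem.List.index? ([] : List Int) c).map (fun k => (k : Int)) := by
    intro c; simp [PySem.Dict.get?_empty, PySem.List.index?_eq_idxOf?]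
  have hA := rpLoop_eq partition [] PySem.Dict.empty [] h0
  simp only [List.length_nil, Nat.cast_zero, List.nil_append] at hA
  rw [hA]
  refine List.map_congr_left (fun b hb => ?_)
  obtain ⟨j, hj⟩ : ∃ j, PySem.List.index? partition b = some j :=
    Option.isSome_iff_exists.mp ((PySem.List.index?_isSome_iff partition b).mpr hb)
  have := index?_update_eq_take partition [] b j (by simp) hj
  rw [this, hj, Option.getD_some]
  simp [PySem.Set.update_nil_left]
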